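-- pv_equiv track=rewrite | github.com/WillLiang713/Open-WebUI-Extensions | Function.py | _remove_roles
-- ===== SOURCE A (Python) =====
-- def _remove_roles(text: str) -> str:
--     """
--     Remove lines that begin with 'SYSTEM:', 'USER:', 'ASSISTANT:', or 'PROMPT:'.
--     """
--     roles = ("SYSTEM:", "USER:", "ASSISTANT:", "PROMPT:")
--     lines = text.split("\n")
--     cleaned = []
--     for line in lines:
--         if any(line.startswith(r) for r in roles):
--             cleaned.append(line.split(":", 1)[1].strip())
--         else:
--             cleaned.append(line)
--     return "\n".join(cleaned).strip()
-- ===== SOURCE B (Python) =====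
-- def _remove_roles(text: str) -> str:
--     roles = ("SYSTEM:", "USER:", "ASSISTANT:", "PROMPT:")
--     pieces = []
--     s = text
--     while True:
--         r = next((r for r in roles if s.startswith(r)), None)
--         if r is not None:
--             line, sep, s = s[len(r):].partition("\n")
--             pieces.append(line.strip())
--         else:
--             line, sep, s = s.partition("\n")
--             pieces.append(line)
--         if not sep:
--             break
--         pieces.append("\n")
--     return "".join(pieces).strip()
-- ===== Notes on version B (the rewrite author's own statement) =====
-- stated objective: alternative
-- what changed: B never builds a list of lines: it consumes the text as a stream with a while-loop (startswith at the current position, slice off the role label by its length, partition at the next newline), appending output pieces and separators flat into one buffer joined once at the end, instead of A's split-into-lines / per-line colon-split / newline-join pipeline.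
import Mathlib
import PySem

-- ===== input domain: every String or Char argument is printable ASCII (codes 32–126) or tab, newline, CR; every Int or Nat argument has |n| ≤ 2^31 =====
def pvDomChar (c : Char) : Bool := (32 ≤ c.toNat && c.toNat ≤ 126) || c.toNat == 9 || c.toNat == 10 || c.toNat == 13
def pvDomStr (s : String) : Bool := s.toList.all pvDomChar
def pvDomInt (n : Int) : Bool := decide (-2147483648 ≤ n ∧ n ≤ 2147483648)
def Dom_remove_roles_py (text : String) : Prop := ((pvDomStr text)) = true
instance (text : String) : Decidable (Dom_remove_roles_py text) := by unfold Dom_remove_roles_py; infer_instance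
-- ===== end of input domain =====

-- B removes role labels by consuming the text as a stream (startswith, slice, partition at the
-- next newline) into one flat piece buffer, instead of A's split-lines/per-line/join pipeline;
-- same cost, a genuinely different traversal.

-- ===== PORT A =====
def remove_roles_py (text : String) : String :=
  let roles : List (List Char) := ["SYSTEM:".toList, "USER:".toList, "ASSISTANT:".toList, "PROMPT:".toList]
  let lines := PySem.Chars.splitOn text.toList ['\n']
  let cleaned := lines.foldl (fun acc line =>
    if roles.any (fun r => PySem.Chars.startswith line r) then
      -- line.split(":", 1)[1].strip(); the guard guarantees index 1 exists, so getD is never taken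
      acc ++ [PySem.Chars.strip ((PySem.List.pyGet? (PySem.Chars.splitOnMax line [':'] 1) 1).getD [])]
    else
      acc ++ [line]) []
  String.ofList (PySem.Chars.strip (PySem.Chars.join ['\n'] cleaned))

-- ===== PORT B =====
def rrRoles : List (List Char) := ["SYSTEM:".toList, "USER:".toList, "ASSISTANT:".toList, "PROMPT:".toList]

-- s.partition("\n") for the single character '\n': exact -- the part before is the maximal
-- newline-free prefix; the separator was found iff that prefix is shorter than s
def rrPart (s : List Char) : List Char × Bool × List Char :=
  if (s.takeWhile (fun c => c != '\n')).length < s.length then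
    (s.takeWhile (fun c => c != '\n'), true, s.drop ((s.takeWhile (fun c => c != '\n')).length + 1))
  else
    (s.takeWhile (fun c => c != '\n'), false, [])

-- one iteration of Source B's while-loop body: the produced piece, whether a separator was found,
-- and the remaining stream
def rrStep (s : List Char) : List Char × Bool × List Char :=
  match rrRoles.find? (fun r => PySem.Chars.startswith s r) with
  | some r =>
      (PySem.Chars.strip (rrPart (s.drop r.length)).1,
       (rrPart (s.drop r.length)).2.1, (rrPart (s.drop r.length)).2.2)
  | none => rrPart s

lemma rrPart_lt (s l rest : List Char) (h : rrPart s = (l, true, rest)) :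
    rest.length < s.length := by
  unfold rrPart at h
  split_ifs at h with hlt
  · simp only [Prod.mk.injEq] at h
    obtain ⟨h1, h2, h3⟩ := h
    subst h3
    simp only [List.length_drop]
    omega
  · simp only [Prod.mk.injEq] at h
    exact absurd h.2.1 (by simp)

lemma rrStep_lt (s piece rest : List Char) (h : rrStep s = (piece, true, rest)) :
    rest.length < s.length := by
  unfold rrStep at h
  rcases hf : rrRoles.find? (fun r => PySem.Chars.startswith s r) with _ | r <;> rw [hf] at h
  · exact rrPart_lt s piece rest h
  · simp only [Prod.mk.injEq] at h
    obtain ⟨h1, h2, h3⟩ := h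
    have hp : rrPart (s.drop r.length) = ((rrPart (s.drop r.length)).1, true, rest) := by
      rw [← h2, ← h3]
    have := rrPart_lt _ _ _ hp
    simp only [List.length_drop] at this ⊢
    omega

def rrLoop (s : List Char) (pieces : List (List Char)) : List (List Char) :=
  match h : rrStep s with
  | (piece, true, rest) => rrLoop rest (pieces ++ [piece, ['\n']])
  | (piece, false, _) => pieces ++ [piece]
termination_by s.length
decreasing_by exact rrStep_lt s piece rest h

def remove_roles_py_alt (text : String) : String :=
  String.ofList (PySem.Chars.strip (PySem.Chars.join [] (rrLoop text.toList [])))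

-- ===== PRECONDITION & SPEC =====
def Spec_remove_roles_py (text : String) (out : String) : Prop := out = remove_roles_py_alt text
instance (text : String) (out : String) : Decidable (Spec_remove_roles_py text out) := by unfold Spec_remove_roles_py; infer_instance

-- ===== CLAIM =====
def Claim_equal_remove_roles_py : Prop := ∀ (text : String), Dom_remove_roles_py text → Spec_remove_roles_py text (remove_roles_py text)

-- ===== LEMMAS AND PROOFS =====

-- the common per-line value both programs produce for one line
def rrCleanLine (line : List Char) : List Char :=
  ((rrRoles.find? (fun r => PySem.Chars.startswith line r)).map
    (fun r => PySem.Chars.strip (line.drop r.length))).getD line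

-- reference splitter: msp carry s = the chunks of carry ++ s split at '\n'
def msp (carry : List Char) : List Char → List (List Char)
  | [] => [carry]
  | c :: rest => if c = '\n' then carry :: msp [] rest else msp (carry ++ [c]) rest

lemma find?_congr' {α : Type} (p q : α → Bool) :
    ∀ l : List α, (∀ a ∈ l, p a = q a) → l.find? p = l.find? q := by
  intro l
  induction l with
  | nil => intro _; rfl
  | cons a l ih =>
    intro h
    simp only [List.find?_cons, h a (List.mem_cons_self ..)]
    cases q a
    · exact ih fun b hb => h b (List.mem_cons_of_mem _ hb)
    · rfl

-- ---- splitOn characterisation ----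
lemma msp_go (s : List Char) : ∀ (fuel : Nat), s.length < fuel →
    ∀ (cur : List Char) (acc : List (List Char)),
    PySem.Chars.splitOn.go ['\n'] fuel s cur acc = acc.reverse ++ msp cur.reverse s := by
  induction s with
  | nil =>
    intro fuel hf cur acc
    cases fuel with
    | zero => omega
    | succ f => simp [PySem.Chars.splitOn.go, msp]
  | cons c rest ih =>
    intro fuel hf cur acc
    cases fuel with
    | zero => simp at hf
    | succ f =>
      by_cases hc : c = '\n'
      · subst hc
        simp only [PySem.Chars.splitOn.go, List.isPrefixOf, beq_self_eq_true, Bool.true_and,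
          List.isPrefixOf_nil_left, if_true, List.length_cons, List.length_nil,
          List.drop_succ_cons, List.drop_zero]
        rw [ih f (by simpa using hf) [] (cur.reverse :: acc)]
        simp [msp]
      · simp only [PySem.Chars.splitOn.go, List.isPrefixOf]
        rw [if_neg (by simp [List.isPrefixOf]; exact fun h => absurd h.symm hc)]
        rw [ih f (by simpa using hf) (c :: cur) acc]
        simp [msp, hc]

lemma splitOn_eq_msp (s : List Char) : PySem.Chars.splitOn s ['\n'] = msp [] s := by
  unfold PySem.Chars.splitOn
  rw [msp_go s (s.length + 1) (by omega) [] []]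
  rfl

lemma msp_no_nl (s : List Char) (h : '\n' ∉ s) : ∀ carry, msp carry s = [carry ++ s] := by
  induction s with
  | nil => intro carry; simp [msp]
  | cons c rest ih =>
    intro carry
    have hc : c ≠ '\n' := fun hc => h (by simp [hc])
    simp only [msp, if_neg hc]
    rw [ih (fun hm => h (List.mem_cons_of_mem _ hm)) (carry ++ [c])]
    simp

lemma msp_mid (pre : List Char) (h : '\n' ∉ pre) :
    ∀ carry t, msp carry (pre ++ '\n' :: t) = (carry ++ pre) :: msp [] t := by
  induction pre with
  | nil => intro carry t; simp [msp]
  | cons c pre' ih =>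
    intro carry t
    have hc : c ≠ '\n' := fun hc => h (by simp [hc])
    simp only [List.cons_append, msp, if_neg hc]
    rw [ih (fun hm => h (List.mem_cons_of_mem _ hm)) (carry ++ [c]) t]
    simp

lemma msp_ne_nil (s : List Char) : ∀ carry, msp carry s ≠ [] := by
  induction s with
  | nil => intro carry; simp [msp]
  | cons c rest ih =>
    intro carry
    simp only [msp]
    split_ifs
    · simp
    · exact ih _

-- ---- join/intercalate helpers ----
lemma join_nil_sep (l : List (List Char)) : PySem.Chars.join [] l = l.flatten := by
  unfold PySem.Chars.join
  induction l with
  | nil => rfl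
  | cons x l ih =>
    cases l with
    | nil => simp [List.intercalate]
    | cons y l' =>
      simp only [List.intercalate, List.intersperse] at *
      simpa using ih

lemma intercalate_singleton (sep x : List Char) : List.intercalate sep [x] = x := by
  simp [List.intercalate]

lemma intercalate_cons (sep x : List Char) (l : List (List Char)) (h : l ≠ []) :
    List.intercalate sep (x :: l) = x ++ sep ++ List.intercalate sep l := by
  cases l with
  | nil => exact absurd rfl h
  | cons y l' => simp [List.intercalate, List.intersperse]

-- ---- takeWhile / prefix helpers ----
lemma tw_all (s : List Char) (h : '\n' ∉ s) : s.takeWhile (fun c => c != '\n') = s := by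
  induction s with
  | nil => rfl
  | cons c rest ih =>
    have hc : c ≠ '\n' := fun hc => h (by simp [hc])
    simp only [List.takeWhile_cons]
    rw [if_pos (by simpa using hc), ih (fun hm => h (List.mem_cons_of_mem _ hm))]

lemma tw_mid (pre t : List Char) (h : '\n' ∉ pre) :
    (pre ++ '\n' :: t).takeWhile (fun c => c != '\n') = pre := by
  induction pre with
  | nil => simp
  | cons c pre' ih =>
    have hc : c ≠ '\n' := fun hc => h (by simp [hc])
    simp only [List.cons_append, List.takeWhile_cons]
    rw [if_pos (by simpa using hc), ih (fun hm => h (List.mem_cons_of_mem _ hm))]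

lemma drop_mid (a t : List Char) (x : Char) : (a ++ x :: t).drop (a.length + 1) = t := by
  rw [show a ++ x :: t = (a ++ [x]) ++ t by simp,
      show a.length + 1 = (a ++ [x]).length by simp, List.drop_left]

-- startswith looks no further than the first newline
lemma sw_mid (pre t r : List Char) (hr : '\n' ∉ r) :
    PySem.Chars.startswith (pre ++ '\n' :: t) r = PySem.Chars.startswith pre r := by
  rw [Bool.eq_iff_iff, PySem.Chars.startswith_iff, PySem.Chars.startswith_iff]
  constructor
  · intro hp
    by_cases hlen : r.length ≤ pre.length
    · exact List.prefix_of_prefix_length_le hp (List.prefix_append _ _) hlen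
    · exfalso
      have h1 : (pre ++ ['\n']) <+: (pre ++ '\n' :: t) := by
        refine ⟨t, by simp⟩
      have h2 : (pre ++ ['\n']) <+: r :=
        List.prefix_of_prefix_length_le h1 hp (by simp; omega)
      exact hr (h2.sublist.mem (by simp))
  · intro hp
    exact hp.trans (List.prefix_append _ _)

-- ---- the two shapes of one loop iteration ----
lemma rrPart_neg (s : List Char) (h : '\n' ∉ s) : rrPart s = (s, false, []) := by
  unfold rrPart
  rw [tw_all s h, if_neg (by omega)]

lemma rrPart_pos (pre t : List Char) (h : '\n' ∉ pre) :
    rrPart (pre ++ '\n' :: t) = (pre, true, t) := by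
  unfold rrPart
  rw [tw_mid pre t h, if_pos (by simp), drop_mid]

lemma rrStep_no_nl (s : List Char) (h : '\n' ∉ s) :
    rrStep s = (rrCleanLine s, false, []) := by
  unfold rrStep
  rcases hf : rrRoles.find? (fun r => PySem.Chars.startswith s r) with _ | r
  · simp [hf, rrPart_neg s h, rrCleanLine]
  · have hno : '\n' ∉ s.drop r.length := fun hm => h (List.mem_of_mem_drop hm)
    simp [hf, rrPart_neg _ hno, rrCleanLine]

lemma rrStep_mid (pre t : List Char) (h : '\n' ∉ pre) :
    rrStep (pre ++ '\n' :: t) = (rrCleanLine pre, true, t) := by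
  have hsw : ∀ r ∈ rrRoles, PySem.Chars.startswith (pre ++ '\n' :: t) r
      = PySem.Chars.startswith pre r := by
    intro r hr
    apply sw_mid
    simp only [rrRoles, List.mem_cons, List.not_mem_nil, or_false] at hr
    rcases hr with h1 | h1 | h1 | h1 <;> subst h1 <;> decide
  have hfind : rrRoles.find? (fun r => PySem.Chars.startswith (pre ++ '\n' :: t) r)
      = rrRoles.find? (fun r => PySem.Chars.startswith pre r) :=
    find?_congr' _ _ _ hsw
  unfold rrStep
  rw [hfind]
  rcases hf : rrRoles.find? (fun r => PySem.Chars.startswith pre r) with _ | r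
  · simp [hf, rrPart_pos pre t h, rrCleanLine]
  · have hrp : r <+: pre := by
      have := List.find?_some hf
      rw [PySem.Chars.startswith_iff] at this
      exact this
    have hlen : r.length ≤ pre.length := hrp.length_le
    have hdropa : (pre ++ '\n' :: t).drop r.length = pre.drop r.length ++ '\n' :: t := by
      rw [List.drop_append_of_le_length hlen]
    have hno : '\n' ∉ pre.drop r.length := fun hm => h (List.mem_of_mem_drop hm)
    simp [hf, hdropa, rrPart_pos _ t hno, rrCleanLine]

-- A's per-line body equals rrCleanLine
lemma rr_go_zero (fuel : Nat) (t : List Char) (acc : List (List Char)) :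
    PySem.Chars.splitOnMax.go [':'] fuel 0 t [] acc = (t :: acc).reverse := by
  cases fuel with
  | zero => simp [PySem.Chars.splitOnMax.go]
  | succ f => cases t <;> simp [PySem.Chars.splitOnMax.go]

lemma rr_go_one (pre : List Char) (h : ':' ∉ pre) :
    ∀ (fuel : Nat), pre.length < fuel → ∀ (t cur : List Char) (acc : List (List Char)),
    PySem.Chars.splitOnMax.go [':'] fuel 1 (pre ++ ':' :: t) cur acc
      = acc.reverse ++ [cur.reverse ++ pre, t] := by
  induction pre with
  | nil =>
    intro fuel hf t cur acc
    cases fuel with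
    | zero => omega
    | succ f =>
      simp only [List.nil_append, PySem.Chars.splitOnMax.go, List.isPrefixOf,
        beq_self_eq_true, Bool.true_and, if_true]
      simp only [show (1:Nat) - 1 = 0 from rfl, List.length_cons, List.length_nil,
        List.drop_succ_cons, List.drop_zero]
      simpa using rr_go_zero f t (cur.reverse :: acc)
  | cons c pre' ih =>
    intro fuel hf t cur acc
    cases fuel with
    | zero => simp at hf
    | succ f =>
      have hc : c ≠ ':' := fun hc => h (by simp [hc])
      simp only [List.cons_append, PySem.Chars.splitOnMax.go]
      rw [if_neg (by omega), if_neg (by simp [List.isPrefixOf]; exact Ne.symm hc)]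
      rw [ih (fun hm => h (List.mem_cons_of_mem _ hm)) f (by simpa using hf) t (c :: cur) acc]
      simp

lemma rr_split1 (pre t : List Char) (h : ':' ∉ pre) :
    PySem.Chars.splitOnMax (pre ++ ':' :: t) [':'] 1 = [pre, t] := by
  unfold PySem.Chars.splitOnMax
  rw [if_neg (by norm_num)]
  have : (1 : Int).toNat = 1 := rfl
  rw [this, rr_go_one pre h _ (by simp) t [] []]
  simp

lemma rr_line_eq (line : List Char) :
    (if (["SYSTEM:".toList, "USER:".toList, "ASSISTANT:".toList, "PROMPT:".toList].any
          (fun r => PySem.Chars.startswith line r)) then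
       PySem.Chars.strip ((PySem.List.pyGet? (PySem.Chars.splitOnMax line [':'] 1) 1).getD [])
     else line) = rrCleanLine line := by
  rcases hf : rrRoles.find? (fun r => PySem.Chars.startswith line r) with _ | r
  · have hnone := List.find?_eq_none.mp hf
    rw [if_neg]
    · unfold rrCleanLine
      rw [hf]
      rfl
    · intro hany
      simp only [List.any_eq_true] at hany
      obtain ⟨r', hm', hp'⟩ := hany
      have hmem' : r' ∈ rrRoles := hm'
      exact absurd hp' (by simpa using hnone r' hmem')
  · have hswb : PySem.Chars.startswith line r = true := List.find?_some hf
    have hmem : r ∈ rrRoles := List.mem_of_find?_eq_some hf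
    have hany : (["SYSTEM:".toList, "USER:".toList, "ASSISTANT:".toList, "PROMPT:".toList].any
        (fun r => PySem.Chars.startswith line r)) = true := by
      simp only [List.any_eq_true]
      exact ⟨r, hmem, hswb⟩
    rw [if_pos hany]
    unfold rrCleanLine
    rw [hf]
    rw [PySem.Chars.startswith_iff] at hswb
    obtain ⟨t, ht⟩ := hswb
    simp only [rrRoles, List.mem_cons, List.not_mem_nil, or_false] at hmem
    have hr4 : ∃ rname, ':' ∉ rname ∧ r = rname ++ [':'] := by
      rcases hmem with h1 | h1 | h1 | h1 <;> subst h1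
      exacts [⟨"SYSTEM".toList, by decide, by decide⟩, ⟨"USER".toList, by decide, by decide⟩,
        ⟨"ASSISTANT".toList, by decide, by decide⟩, ⟨"PROMPT".toList, by decide, by decide⟩]
    obtain ⟨rname, hnc, hrn⟩ := hr4
    have hline : line = rname ++ ':' :: t := by rw [← ht, hrn]; simp
    have hrl : r.length = rname.length + 1 := by rw [hrn]; simp
    simp only [Option.map_some, Option.getD_some]
    rw [hline, rr_split1 rname t hnc, hrl, drop_mid]
    simp [PySem.List.pyGet?, PySem.List.pyIdx?]

-- line decomposition at the first newline
lemma dec_nl (s : List Char) :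
    '\n' ∉ s ∨ ∃ pre t, '\n' ∉ pre ∧ s = pre ++ '\n' :: t := by
  by_cases h : '\n' ∈ s
  · right
    set pre := s.takeWhile (fun c => c != '\n') with hpre
    have hd : s = pre ++ s.dropWhile (fun c => c != '\n') :=
      (List.takeWhile_append_dropWhile).symm
    have hne : s.dropWhile (fun c => c != '\n') ≠ [] := by
      intro hnil
      rw [hnil, List.append_nil] at hd
      have : '\n' ∈ pre := hd ▸ h
      have := List.mem_takeWhile_imp this
      simp at this
    obtain ⟨c, rest, hcr⟩ := List.exists_cons_of_ne_nil hne
    have hcolon : c = '\n' := by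
      have := List.head_dropWhile_not (fun c => c != '\n') (l := s) hne
      simp [hcr] at this
      exact this
    refine ⟨pre, rest, fun hm => by simpa using List.mem_takeWhile_imp hm, ?_⟩
    conv_lhs => rw [hd, hcr, hcolon]
  · left; exact h

-- the loop flattens to the intercalated cleaned chunks
lemma loop_eq : ∀ (n : Nat) (s : List Char), s.length < n → ∀ (pieces : List (List Char)),
    PySem.Chars.join [] (rrLoop s pieces)
      = PySem.Chars.join [] pieces ++ List.intercalate ['\n'] ((msp [] s).map rrCleanLine) := by
  intro n
  induction n with
  | zero => intro s h; omega
  | succ n ih =>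
    intro s hlen pieces
    rcases dec_nl s with hno | ⟨pre, t, hpre, hdec⟩
    · rw [rrLoop]
      rw [rrStep_no_nl s hno]
      simp only
      rw [msp_no_nl s hno [], join_nil_sep, join_nil_sep]
      simp [intercalate_singleton]
    · subst hdec
      rw [rrLoop]
      rw [rrStep_mid pre t hpre]
      simp only
      have ht : t.length < n := by
        have : (pre ++ '\n' :: t).length = pre.length + 1 + t.length := by simp; omega
        omega
      rw [ih t ht (pieces ++ [rrCleanLine pre, ['\n']])]
      rw [msp_mid pre hpre [] t]
      simp only [List.nil_append, List.map_cons]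
      rw [intercalate_cons _ _ _ (by simp [msp_ne_nil])]
      rw [join_nil_sep, join_nil_sep]
      simp

-- ===== VERDICT (by name: the statement is the Claim_ definition above) =====
theorem remove_roles_py_spec : Claim_equal_remove_roles_py := by
  intro text _
  unfold Spec_remove_roles_py remove_roles_py remove_roles_py_alt
  simp only
  congr 2
  have hmap : ∀ (acc : List (List Char)) (line : List Char),
      (if (["SYSTEM:".toList, "USER:".toList, "ASSISTANT:".toList, "PROMPT:".toList].any
            (fun r => PySem.Chars.startswith line r)) then
         acc ++ [PySem.Chars.strip ((PySem.List.pyGet? (PySem.Chars.splitOnMax line [':'] 1) 1).getD [])]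
       else acc ++ [line]) = acc ++ [rrCleanLine line] := by
    intro acc line
    rw [← rr_line_eq line]
    split <;> rfl
  rw [show (fun (acc : List (List Char)) (line : List Char) =>
        if (["SYSTEM:".toList, "USER:".toList, "ASSISTANT:".toList, "PROMPT:".toList].any
              (fun r => PySem.Chars.startswith line r)) = true then
          acc ++ [PySem.Chars.strip ((PySem.List.pyGet? (PySem.Chars.splitOnMax line [':'] 1) 1).getD [])]
        else acc ++ [line])
      = (fun acc line => acc ++ [rrCleanLine line]) from funext fun acc => funext fun line => hmap acc line,
      PySem.List.foldl_append_singleton_eq_map]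
  rw [loop_eq (text.toList.length + 1) text.toList (by omega) []]
  rw [splitOn_eq_msp]
  simp only [List.nil_append]
  rfl
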